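-- pv_equiv track=rewrite | github.com/pypi-data/pypi-mirror-401 | packages/atloop/atloop-0.1.0.tar.gz/atloop-0.1.0/atloop/tools/interaction/todo_write.py | _parse_markdown_todos
-- ===== SOURCE A (Python) =====
-- from typing import Any, Dict, List, Optional
--
-- def _parse_markdown_todos(content: str) -> List[Dict[str, Any]]:
--     """Parse markdown TODO format."""
--     todos = []
--     lines = content.split("\n")
--     current_todo = None
--
--     for line in lines:
--         line = line.strip()
--         if line.startswith("- [ ]") or line.startswith("- [x]"):
--             # New todo item
--             if current_todo:
--                 todos.append(current_todo)
--
--             status = "completed" if line.startswith("- [x]") else "pending"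
--             content_text = line[5:].strip()
--             current_todo = {
--                 "content": content_text,
--                 "activeForm": content_text,  # Default to same as content
--                 "status": status,
--             }
--         elif current_todo and line:
--             # Continuation of current todo
--             current_todo["content"] += " " + line
--
--     if current_todo:
--         todos.append(current_todo)
--
--     return todos
-- ===== SOURCE B (Python) =====
-- def _is_box(ln):
--     return ln.startswith("- [ ]") or ln.startswith("- [x]")
--
--
-- def _parse_blocks(lines):
--     """lines: stripped, non-empty lines; emit one todo per checkbox block."""
--     if not lines:
--         return []
--     head, rest = lines[0], lines[1:]
--     if not _is_box(head):
--         return _parse_blocks(rest)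
--     i = 0
--     while i < len(rest) and not _is_box(rest[i]):
--         i += 1
--     text = head[5:].strip()
--     todo = {
--         "content": " ".join([text] + rest[:i]),
--         "activeForm": text,
--         "status": "completed" if head.startswith("- [x]") else "pending",
--     }
--     return [todo] + _parse_blocks(rest[i:])
--
--
-- def _parse_markdown_todos(content):
--     lines = [ln.strip() for ln in content.split("\n")]
--     return _parse_blocks([ln for ln in lines if ln])
-- ===== Notes on version B (the rewrite author's own statement) =====
-- stated objective: simpler
-- what changed: A threads a mutable current-todo dict through one stateful loop; B is a recursive block-at-a-time parser over the pre-stripped non-blank lines, building each todo in one place with a single join instead of incremental string appends.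
import Mathlib
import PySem

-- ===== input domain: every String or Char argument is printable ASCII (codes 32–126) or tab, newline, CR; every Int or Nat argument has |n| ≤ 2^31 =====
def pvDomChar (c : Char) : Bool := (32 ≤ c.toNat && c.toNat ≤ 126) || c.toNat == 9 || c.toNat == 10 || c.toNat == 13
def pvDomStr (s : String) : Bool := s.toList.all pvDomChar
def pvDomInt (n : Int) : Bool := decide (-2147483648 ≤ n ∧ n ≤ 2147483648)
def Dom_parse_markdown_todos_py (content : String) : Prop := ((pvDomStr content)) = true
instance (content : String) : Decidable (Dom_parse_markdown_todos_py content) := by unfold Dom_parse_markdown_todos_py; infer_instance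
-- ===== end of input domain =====

-- B replaces A's stateful loop with a mutable current-todo dict by a recursive
-- block-at-a-time parser over the pre-stripped non-blank lines (objective: simpler).

-- ===== PORT A =====
-- current_todo["content"] += " " + line : the dict update rewrites the "content"
-- entry in place (keys are unique), exact as a map over the association list
def pvSetAdd (d : List (String × String)) (line : String) : List (String × String) :=
  d.map (fun kv => if kv.1 == "content" then (kv.1, kv.2 ++ " " ++ line) else kv)

def pvStep (st : List (List (String × String)) × Option (List (String × String)))
    (line0 : String) :
    List (List (String × String)) × Option (List (String × String)) :=
  let line := PySem.Str.strip line0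
  if PySem.Str.startswith line "- [ ]" || PySem.Str.startswith line "- [x]" then
    let todos := match st.2 with | some c => st.1 ++ [c] | none => st.1
    let status := if PySem.Str.startswith line "- [x]" then "completed" else "pending"
    let text := PySem.Str.strip (PySem.Str.slice line (some 5) none)
    (todos, some [("content", text), ("activeForm", text), ("status", status)])
  else
    -- 'elif current_todo and line': current_todo is a 3-key dict, so truthy iff present
    match st.2 with
    | some c => if line != "" then (st.1, some (pvSetAdd c line)) else st
    | none => st

def parse_markdown_todos_py (content : String) : List (List (String × String)) :=
  let lines := (PySem.Str.split? content "\n").getD []   -- "\n" ≠ "", so split? is some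
  let st := lines.foldl pvStep ([], none)
  match st.2 with | some c => st.1 ++ [c] | none => st.1

-- ===== PORT B =====
def pvIsBox (l : String) : Bool :=
  PySem.Str.startswith l "- [ ]" || PySem.Str.startswith l "- [x]"

def pvParseBlocks : List String → List (List (String × String))
  | [] => []
  | head :: rest =>
    if pvIsBox head then
      -- i in Source B is the index of the first checkbox line in rest, so
      -- rest[:i] / rest[i:] are takeWhile / dropWhile of (not ∘ pvIsBox) — exact
      let cont := rest.takeWhile (fun x => !pvIsBox x)
      let text := PySem.Str.strip (PySem.Str.slice head (some 5) none)
      [("content", PySem.Str.join " " (text :: cont)),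
       ("activeForm", text),
       ("status", if PySem.Str.startswith head "- [x]" then "completed" else "pending")]
        :: pvParseBlocks (rest.dropWhile (fun x => !pvIsBox x))
    else pvParseBlocks rest
termination_by ls => ls.length
decreasing_by
  · exact Nat.lt_succ_of_le (List.length_dropWhile_le _ _)
  · simp

def parse_markdown_todos_py_alt (content : String) : List (List (String × String)) :=
  let lines := ((PySem.Str.split? content "\n").getD []).map PySem.Str.strip
  pvParseBlocks (lines.filter (fun l => l != ""))

-- ===== PRECONDITION & SPEC =====
def Spec_parse_markdown_todos_py (content : String) (out : List (List (String × String))) : Prop := out = parse_markdown_todos_py_alt content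
instance (content : String) (out : List (List (String × String))) : Decidable (Spec_parse_markdown_todos_py content out) := by unfold Spec_parse_markdown_todos_py; infer_instance

-- ===== CLAIM (what is proved, stated in full; the proofs are below) =====
def Claim_equal_parse_markdown_todos_py : Prop := ∀ (content : String), Dom_parse_markdown_todos_py content → Spec_parse_markdown_todos_py content (parse_markdown_todos_py content)

-- ===== LEMMAS AND PROOFS =====

-- step on an already-stripped line
def pvStepS (st : List (List (String × String)) × Option (List (String × String)))
    (line : String) :
    List (List (String × String)) × Option (List (String × String)) :=
  if pvIsBox line then
    let todos := match st.2 with | some c => st.1 ++ [c] | none => st.1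
    let status := if PySem.Str.startswith line "- [x]" then "completed" else "pending"
    let text := PySem.Str.strip (PySem.Str.slice line (some 5) none)
    (todos, some [("content", text), ("activeForm", text), ("status", status)])
  else
    match st.2 with
    | some c => if line != "" then (st.1, some (pvSetAdd c line)) else st
    | none => st

lemma pvStep_eq_stepS (st : List (List (String × String)) × Option (List (String × String)))
    (l : String) : pvStep st l = pvStepS st (PySem.Str.strip l) := by
  simp [pvStep, pvStepS, pvIsBox]

def pvFinish (st : List (List (String × String)) × Option (List (String × String))) :
    List (List (String × String)) :=
  match st.2 with | some c => st.1 ++ [c] | none => st.1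

def pvText (h : String) : String := PySem.Str.strip (PySem.Str.slice h (some 5) none)

def pvCur (h : String) (cs : List String) : List (String × String) :=
  [("content", PySem.Str.join " " (pvText h :: cs)),
   ("activeForm", pvText h),
   ("status", if PySem.Str.startswith h "- [x]" then "completed" else "pending")]

lemma pvIsBox_empty : pvIsBox "" = false := by decide

lemma pvIsBox_ne_empty {l : String} (h : pvIsBox l = true) : (l != "") = true := by
  rcases eq_or_ne l "" with rfl | hne
  · rw [pvIsBox_empty] at h; exact absurd h (by simp)
  · simpa using hne

lemma chars_join_append_singleton (sep y x : List Char) (xs : List (List Char)) :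
    PySem.Chars.join sep (x :: xs ++ [y]) = PySem.Chars.join sep (x :: xs) ++ sep ++ y := by
  induction xs generalizing x with
  | nil => simp [PySem.Chars.join_cons_cons, PySem.Chars.join_singleton]
  | cons a as ih =>
    simp only [List.cons_append, PySem.Chars.join_cons_cons]
    rw [← List.cons_append, ih a]
    simp [List.append_assoc]

lemma join_append_singleton (sep y x : String) (xs : List String) :
    PySem.Str.join sep (x :: xs ++ [y]) = PySem.Str.join sep (x :: xs) ++ sep ++ y := by
  apply String.toList_injective
  simp only [PySem.Str.toList_join, List.map_cons, List.map_append, List.map_nil,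
    String.toList_append]
  rw [chars_join_append_singleton]

lemma str_join_singleton (sep t : String) : PySem.Str.join sep [t] = t := by
  apply String.toList_injective
  simp [PySem.Str.toList_join, PySem.Chars.join_singleton]

lemma pvSetAdd_cur (h l : String) (cs : List String) :
    pvSetAdd (pvCur h cs) l = pvCur h (cs ++ [l]) := by
  simp [pvSetAdd, pvCur, ← join_append_singleton]

lemma pvParseBlocks_box {l : String} (hb : pvIsBox l = true) (rest : List String) :
    pvParseBlocks (l :: rest)
      = pvCur l (rest.takeWhile (fun x => !pvIsBox x))
          :: pvParseBlocks (rest.dropWhile (fun x => !pvIsBox x)) := by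
  rw [pvParseBlocks, if_pos hb]; rfl

lemma pvParseBlocks_nonbox {l : String} (hb : pvIsBox l = false) (rest : List String) :
    pvParseBlocks (l :: rest) = pvParseBlocks rest := by
  rw [pvParseBlocks, if_neg (by simp [hb])]

lemma A_open (ls : List String) (acc : List (List (String × String)))
    (h : String) (cs : List String) :
    pvFinish (ls.foldl pvStepS (acc, some (pvCur h cs)))
      = acc ++ pvCur h (cs ++ (ls.filter (fun l => l != "")).takeWhile (fun x => !pvIsBox x))
          :: pvParseBlocks ((ls.filter (fun l => l != "")).dropWhile (fun x => !pvIsBox x)) := by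
  induction ls generalizing acc h cs with
  | nil => simp [pvFinish, pvParseBlocks]
  | cons l rest ih =>
    by_cases hb : pvIsBox l = true
    · have hne := pvIsBox_ne_empty hb
      have hstep : pvStepS (acc, some (pvCur h cs)) l
          = (acc ++ [pvCur h cs], some (pvCur l [])) := by
        simp [pvStepS, hb, pvCur, pvText, str_join_singleton]
      rw [List.foldl_cons, hstep, ih]
      simp [hne, hb, pvParseBlocks_box hb]
    · have hb' : pvIsBox l = false := by simpa using hb
      by_cases he : l = ""
      · subst he
        have hstep : pvStepS (acc, some (pvCur h cs)) ""
            = (acc, some (pvCur h cs)) := by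
          simp [pvStepS, pvIsBox_empty]
        rw [List.foldl_cons, hstep, ih]
        simp
      · have hne : (l != "") = true := by simpa using he
        have hstep : pvStepS (acc, some (pvCur h cs)) l
            = (acc, some (pvCur h (cs ++ [l]))) := by
          simp [pvStepS, hb', hne, pvSetAdd_cur]
        rw [List.foldl_cons, hstep, ih]
        simp [hne, hb']

lemma A_closed (ls : List String) (acc : List (List (String × String))) :
    pvFinish (ls.foldl pvStepS (acc, none))
      = acc ++ pvParseBlocks (ls.filter (fun l => l != "")) := by
  induction ls generalizing acc with
  | nil => simp [pvFinish, pvParseBlocks]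
  | cons l rest ih =>
    by_cases hb : pvIsBox l = true
    · have hne := pvIsBox_ne_empty hb
      have hstep : pvStepS (acc, none) l = (acc, some (pvCur l [])) := by
        simp [pvStepS, hb, pvCur, pvText, str_join_singleton]
      rw [List.foldl_cons, hstep, A_open]
      simp [hne, pvParseBlocks_box hb]
    · have hb' : pvIsBox l = false := by simpa using hb
      have hstep : pvStepS (acc, none) l = (acc, none) := by
        simp [pvStepS, hb']
      rw [List.foldl_cons, hstep, ih]
      by_cases he : l = ""
      · subst he; simp
      · have hne : (l != "") = true := by simpa using he
        simp [hne, pvParseBlocks_nonbox hb']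

-- ===== VERDICT (by name: the statement is the Claim_ definition above) =====
theorem parse_markdown_todos_py_spec : Claim_equal_parse_markdown_todos_py := by
  intro content _
  unfold Spec_parse_markdown_todos_py
  simp only [parse_markdown_todos_py, parse_markdown_todos_py_alt]
  have key := A_closed (((PySem.Str.split? content "\n").getD []).map PySem.Str.strip) []
  rw [List.foldl_map] at key
  simp only [← pvStep_eq_stepS] at key
  simpa [pvFinish] using key
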